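-- pv_equiv track=rewrite | github.com/JasonSpaw/Cryptotrage_9000 | Cryptotrage_9000.py | available_tickers_paths
-- ===== SOURCE A (Python) =====
-- def available_tickers_paths(product_list):
--     tickers = []
--     bi_paths = []
--     tri_paths = []
--     for i in product_list:
--         tick1, tick2 = i.split('-')
--         if tick1 not in tickers:
--             tickers.append(tick1)
--         if tick2 not in tickers:
--             tickers.append(tick2)
--
--     for i in tickers:
--         for j in tickers:
--             if i == j:
--                 continue
--             else:
--                 bi_paths.append(f"{i}-{j}")
--     for i in tickers:
--         for j in tickers:
--             for k in tickers:
--                 if i == j or i == k or j == k: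
--                     continue
--                 else:
--                     tri_paths.append(f"{i}-{j}-{k}")
--     return tickers, bi_paths, tri_paths
-- ===== SOURCE B (Python) =====
-- def available_tickers_paths(product_list):
--     parts = []
--     for p in product_list:
--         tick1, tick2 = p.split('-')
--         parts += (tick1, tick2)
--     tickers = list(dict.fromkeys(parts))
--
--     def perms(items, r):
--         if r == 0:
--             return [[]]
--         return [[x] + rest
--                 for idx, x in enumerate(items)
--                 for rest in perms(items[:idx] + items[idx + 1:], r - 1)]
--
--     bi_paths = ['-'.join(p) for p in perms(tickers, 2)]
--     tri_paths = ['-'.join(p) for p in perms(tickers, 3)]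
--     return tickers, bi_paths, tri_paths
-- ===== Notes on version B (the rewrite author's own statement) =====
-- stated objective: alternative
-- what changed: B flattens all split halves into one list deduplicated via dict.fromkeys, and replaces the three hand-written nested skip-on-equal loops by a single recursive k-permutation generator (pick an element by index, recurse on the list with it removed) used for both pairs and triples.
import Mathlib
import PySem

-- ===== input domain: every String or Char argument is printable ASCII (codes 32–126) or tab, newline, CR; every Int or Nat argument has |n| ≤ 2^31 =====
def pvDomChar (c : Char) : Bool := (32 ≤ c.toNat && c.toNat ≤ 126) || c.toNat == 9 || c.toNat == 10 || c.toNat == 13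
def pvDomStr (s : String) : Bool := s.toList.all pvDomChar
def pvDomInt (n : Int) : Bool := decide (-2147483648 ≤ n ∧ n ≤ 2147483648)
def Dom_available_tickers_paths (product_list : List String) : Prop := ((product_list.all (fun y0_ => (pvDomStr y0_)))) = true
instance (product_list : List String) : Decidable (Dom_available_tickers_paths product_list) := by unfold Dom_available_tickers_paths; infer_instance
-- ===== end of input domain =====

-- B flattens the split halves into one dedup pass (dict.fromkeys) and generates pairs and
-- triples with a single recursive k-permutation generator instead of three nested loops.


-- ===== PORT A =====
-- 'tick1, tick2 = i.split('-')' raises ValueError unless the split has exactly 2 parts;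
-- those inputs are excluded by Pre_ (the '_' branch is unreachable under Pre_).
def pvStepA (tickers : List String) (i : String) : List String :=
  match PySem.Str.split? i "-" with
  | some [tick1, tick2] =>
    let tickers := if tick1 ∈ tickers then tickers else tickers ++ [tick1]
    if tick2 ∈ tickers then tickers else tickers ++ [tick2]
  | _ => tickers

def pvBiA (tickers : List String) : List String :=
  tickers.foldl (fun acc i =>
    tickers.foldl (fun acc j =>
      if i == j then acc else acc ++ [PySem.Str.join "-" [i, j]]) acc) []

def pvTriA (tickers : List String) : List String :=
  tickers.foldl (fun acc i =>
    tickers.foldl (fun acc j =>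
      tickers.foldl (fun acc k =>
        if i == j || i == k || j == k then acc
        else acc ++ [PySem.Str.join "-" [i, j, k]]) acc) acc) []

def available_tickers_paths (product_list : List String) : List String × List String × List String :=
  let tickers := product_list.foldl pvStepA []
  (tickers, pvBiA tickers, pvTriA tickers)

-- ===== PORT B =====
-- 'tick1, tick2 = p.split('-')' raises ValueError unless the split has exactly 2 parts;
-- those inputs are excluded by Pre_ (the '_' branch is unreachable under Pre_).
def pvPartsStepB (parts : List String) (p : String) : List String :=
  match PySem.Str.split? p "-" with
  | some [tick1, tick2] => parts ++ [tick1, tick2]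
  | _ => parts

-- perms(items, r): [[x] + rest for idx, x in enumerate(items)
--                             for rest in perms(items[:idx] + items[idx+1:], r - 1)]
def pvPermsB : Nat → List String → List (List String)
  | 0, _ => [[]]
  | r + 1, items =>
    (PySem.List.enumerate items).flatMap (fun ix =>
      (pvPermsB r (PySem.List.slice items none (some ix.1) ++
                   PySem.List.slice items (some (ix.1 + 1)) none)).map
        (fun rest => ix.2 :: rest))

def available_tickers_paths_alt (product_list : List String) : List String × List String × List String :=
  let parts := product_list.foldl pvPartsStepB []
  let tickers := PySem.List.dedup parts
  (tickers,
   (pvPermsB 2 tickers).map (PySem.Str.join "-"),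
   (pvPermsB 3 tickers).map (PySem.Str.join "-"))

-- ===== PRECONDITION & SPEC =====
-- Pre_ excludes exactly the inputs containing a string whose split on '-' does not have
-- exactly two parts: there A's tuple unpacking raises ValueError.
def Pre_available_tickers_paths (product_list : List String) : Prop :=
  ∀ s ∈ product_list, ((PySem.Str.split? s "-").getD []).length = 2
instance (product_list : List String) : Decidable (Pre_available_tickers_paths product_list) := by unfold Pre_available_tickers_paths; infer_instance

def pvWitness_available_tickers_paths : List String := ["BTC-USD", "ETH-USD", "ETH-BTC"]

def Spec_available_tickers_paths (product_list : List String) (out : List String × List String × List String) : Prop := out = available_tickers_paths_alt product_list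
instance (product_list : List String) (out : List String × List String × List String) : Decidable (Spec_available_tickers_paths product_list out) := by unfold Spec_available_tickers_paths; infer_instance

-- ===== CLAIM (what is proved, stated in full; the proofs are below) =====
def Claim_equal_available_tickers_paths : Prop := ∀ (product_list : List String), Dom_available_tickers_paths product_list → Pre_available_tickers_paths product_list → Spec_available_tickers_paths product_list (available_tickers_paths product_list)

-- ===== LEMMAS AND PROOFS =====

-- A's dedup step on a product splitting to [a, b] is two Set.add's
theorem pv_stepA_add (acc : List String) (p a b : String)
    (h : PySem.Str.split? p "-" = some [a, b]) :
    pvStepA acc p = PySem.Set.add (PySem.Set.add acc a) b := by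
  unfold pvStepA
  rw [h]
  simp only [PySem.Set.add, PySem.Set.contains, List.contains_eq_mem]
  by_cases h1 : a ∈ acc <;> by_cases h2 : b ∈ acc <;> simp [h1, h2]

-- under Pre_, B's parts loop flattens the two split halves of every product
theorem pv_parts_eq (product_list : List String) (ps : List String)
    (hpre : ∀ s ∈ product_list, ((PySem.Str.split? s "-").getD []).length = 2) :
    product_list.foldl pvPartsStepB ps
      = ps ++ product_list.flatMap (fun p => (PySem.Str.split? p "-").getD []) := by
  rw [PySem.List.foldl_congr_mem' product_list pvPartsStepB
    (fun parts p => parts ++ (PySem.Str.split? p "-").getD []) ps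
    (by intro p hp parts
        have := hpre p hp
        unfold pvPartsStepB
        rcases hs : PySem.Str.split? p "-" with _ | ls
        · simp [hs] at this
        · rw [hs] at this
          match ls, this with
          | [a, b], _ => simp [hs])]
  exact PySem.List.foldl_append_eq_flatMap _ _ _

-- A's first loop computes the ordered dedup of the flattened split parts
theorem pv_tickers_eq (product_list : List String) (acc : List String)
    (hpre : ∀ s ∈ product_list, ((PySem.Str.split? s "-").getD []).length = 2) :
    product_list.foldl pvStepA acc
      = (product_list.flatMap (fun p => (PySem.Str.split? p "-").getD [])).foldl
          PySem.Set.add acc := by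
  induction product_list generalizing acc with
  | nil => rfl
  | cons p rest ih =>
    have hp := hpre p List.mem_cons_self
    rw [List.foldl_cons, List.flatMap_cons, List.foldl_append]
    rcases hs : PySem.Str.split? p "-" with _ | ls
    · simp [hs] at hp
    · rw [hs] at hp
      match ls, hp with
      | [a, b], _ =>
        rw [pv_stepA_add acc p a b hs]
        simp only [Option.getD_some, List.foldl_cons, List.foldl_nil]
        exact ih _ (fun s hsm => hpre s (List.mem_cons_of_mem _ hsm))

-- removing the element at index k from a duplicate-free list is filtering it out
theorem pv_eraseIdx_eq_filter (l : List String) (k : Nat) (hk : k < l.length)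
    (hl : l.Nodup) :
    l.take k ++ l.drop (k + 1) = l.filter (fun y => y != l[k]) := by
  induction l generalizing k with
  | nil => simp at hk
  | cons x xs ih =>
    rw [List.nodup_cons] at hl
    obtain ⟨hx, hxs⟩ := hl
    match k, hk with
    | 0, _ =>
      simp only [List.take_zero, List.drop_succ_cons, List.drop_zero, List.nil_append,
        List.getElem_cons_zero, List.filter_cons]
      have : (x != x) = false := by simp
      rw [this]
      simp only [Bool.false_eq_true, if_false]
      symm
      rw [List.filter_eq_self]
      intro y hy
      exact bne_iff_ne.2 (fun h => hx (h ▸ hy))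
    | k + 1, hk =>
      have hk' : k < xs.length := by simpa using hk
      simp only [List.take_succ_cons, List.drop_succ_cons, List.cons_append,
        List.getElem_cons_succ, List.filter_cons]
      have hmem : xs[k] ∈ xs := List.getElem_mem _
      have hxk : (x != xs[k]) = true := bne_iff_ne.2 (fun h => hx (h ▸ hmem))
      rw [hxk]
      simp only [if_true, List.cons.injEq, true_and]
      exact ih k hk' hxs

-- a flatMap over enumerate whose function only reads the element ignores the indices
theorem pv_flatMap_enumerate_snd {β : Type} (l : List String) (s : Int) (G : String → List β) :
    (PySem.List.enumerate l s).flatMap (fun ix => G ix.2) = l.flatMap G := by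
  induction l generalizing s with
  | nil => rfl
  | cons x xs ih => rw [PySem.List.enumerate_cons]; simp only [List.flatMap_cons, ih]

-- one unfolding of B's recursive permutation generator over a duplicate-free list
theorem pv_perms_succ (l : List String) (hl : l.Nodup) (r : Nat) :
    pvPermsB (r + 1) l
      = l.flatMap (fun x => (pvPermsB r (l.filter (fun y => y != x))).map (x :: ·)) := by
  conv_lhs => rw [pvPermsB]
  have hcongr : ∀ ix ∈ PySem.List.enumerate l,
      (pvPermsB r (PySem.List.slice l none (some ix.1) ++
                   PySem.List.slice l (some (ix.1 + 1)) none)).map (ix.2 :: ·)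
      = (pvPermsB r (l.filter (fun y => y != ix.2))).map (ix.2 :: ·) := by
    intro ix hix
    rcases (PySem.List.mem_enumerate_iff l 0 ix).1 hix with ⟨k, hk, rfl⟩
    dsimp only
    have hc1 : (0 : Int) + (k : Int) = ((k : Nat) : Int) := by omega
    have hc2 : (k : Int) + 1 = (((k + 1 : Nat)) : Int) := by omega
    rw [hc1, hc2, PySem.List.slice_to_natCast, PySem.List.slice_from_natCast,
      pv_eraseIdx_eq_filter l k hk hl]
  rw [List.flatMap_congr hcongr]
  exact pv_flatMap_enumerate_snd l 0
    (fun x => (pvPermsB r (l.filter (fun y => y != x))).map (x :: ·))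

-- perms(items, 1) = [[x] for x in items]
theorem pv_perms_one (l : List String) (hl : l.Nodup) :
    pvPermsB 1 l = l.map (fun x => [x]) := by
  rw [pv_perms_succ l hl 0]
  show l.flatMap (fun x => [[x]]) = _
  induction l with
  | nil => rfl
  | cons x xs ih => simp_all

-- B's 2-permutations, joined: the pair normal form
theorem pv_permsB_two (l : List String) (hl : l.Nodup) :
    (pvPermsB 2 l).map (PySem.Str.join "-")
      = l.flatMap (fun i => (l.filter (fun j => j != i)).map
          (fun j => PySem.Str.join "-" [i, j])) := by
  rw [pv_perms_succ l hl 1, List.map_flatMap]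
  refine List.flatMap_congr ?_
  intro i _
  rw [pv_perms_one _ (hl.filter _)]
  simp [List.map_map, Function.comp_def]

-- B's 3-permutations, joined: the triple normal form
theorem pv_permsB_three (l : List String) (hl : l.Nodup) :
    (pvPermsB 3 l).map (PySem.Str.join "-")
      = l.flatMap (fun i => (l.filter (fun j => j != i)).flatMap
          (fun j => (l.filter (fun k => k != i && k != j)).map
            (fun k => PySem.Str.join "-" [i, j, k]))) := by
  rw [pv_perms_succ l hl 2, List.map_flatMap]
  refine List.flatMap_congr ?_
  intro i _
  rw [pv_perms_succ _ (hl.filter _) 1, List.map_flatMap, List.map_flatMap]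
  refine List.flatMap_congr ?_
  intro j hj
  rw [pv_perms_one _ ((hl.filter _).filter _), List.filter_filter]
  simp only [List.map_map, Function.comp_def]
  refine congrArg _ (List.filter_congr ?_)
  intro k _
  rw [Bool.and_comm]

-- helper reused for A's loop shapes: skip elements with empty image, rename the rest
theorem pv_flatMap_filter {α β : Type} (l : List α) (p : α → Bool) (F G : α → List β)
    (hFG : ∀ x ∈ l, p x = true → F x = G x)
    (h0 : ∀ x ∈ l, p x = false → F x = []) :
    l.flatMap F = (l.filter p).flatMap G := by
  induction l with
  | nil => rfl
  | cons x xs ih =>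
    have ih' := ih (fun y hy => hFG y (List.mem_cons_of_mem _ hy))
      (fun y hy => h0 y (List.mem_cons_of_mem _ hy))
    by_cases hx : p x = true
    · simp only [List.flatMap_cons, List.filter_cons, hx, if_true,
        hFG x List.mem_cons_self hx, ih']
    · have hx' : p x = false := by revert hx; cases p x <;> simp
      simp only [List.flatMap_cons, h0 x List.mem_cons_self hx', List.filter_cons, hx',
        List.nil_append, Bool.false_eq_true, if_false, ih']

-- A's nested bi-path loop equals B's 2-permutations mapped to strings
theorem pv_bi_eq (tickers : List String) (hl : tickers.Nodup) :
    pvBiA tickers = (pvPermsB 2 tickers).map (PySem.Str.join "-") := by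
  unfold pvBiA
  have hin : ∀ (i : String) (acc : List String),
      tickers.foldl (fun acc j =>
        if i == j then acc else acc ++ [PySem.Str.join "-" [i, j]]) acc
      = acc ++ (tickers.filter (fun j => j != i)).map (fun j => PySem.Str.join "-" [i, j]) := by
    intro i acc
    rw [PySem.List.foldl_congr_mem tickers _
      (fun acc j => if (j != i) then acc ++ [PySem.Str.join "-" [i, j]] else acc) acc
      (by intro acc j _
          by_cases h : (i == j) = true
          · have : i = j := by simpa using h
            subst this; simp
          · have hji : (j == i) = false := by
              rw [Bool.beq_comm]; revert h; cases (i == j) <;> simp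
            simp [bne, h, hji])]
    exact PySem.List.foldl_append_if _ _ _ _
  rw [PySem.List.foldl_congr_mem tickers _
    (fun acc i => acc ++ (tickers.filter (fun j => j != i)).map (fun j => PySem.Str.join "-" [i, j])) []
    (by intro acc i _; exact hin i acc)]
  rw [PySem.List.foldl_append_eq_flatMap, List.nil_append, pv_permsB_two tickers hl]

-- A's triple nested tri-path loop equals B's 3-permutations mapped to strings
theorem pv_tri_eq (tickers : List String) (hl : tickers.Nodup) :
    pvTriA tickers = (pvPermsB 3 tickers).map (PySem.Str.join "-") := by
  unfold pvTriA
  have hk : ∀ (i j : String) (acc : List String),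
      tickers.foldl (fun acc k =>
        if i == j || i == k || j == k then acc
        else acc ++ [PySem.Str.join "-" [i, j, k]]) acc
      = acc ++ (tickers.filter (fun k => !(i == j || i == k || j == k))).map
          (fun k => PySem.Str.join "-" [i, j, k]) := by
    intro i j acc
    rw [PySem.List.foldl_congr_mem tickers _
      (fun acc k => if !(i == j || i == k || j == k)
        then acc ++ [PySem.Str.join "-" [i, j, k]] else acc) acc
      (by intro acc k _; by_cases h : (i == j || i == k || j == k) = true <;> simp [h])]
    exact PySem.List.foldl_append_if _ _ _ _
  have hj : ∀ (i : String) (acc : List String),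
      tickers.foldl (fun acc j =>
        tickers.foldl (fun acc k =>
          if i == j || i == k || j == k then acc
          else acc ++ [PySem.Str.join "-" [i, j, k]]) acc) acc
      = acc ++ tickers.flatMap (fun j =>
          (tickers.filter (fun k => !(i == j || i == k || j == k))).map
            (fun k => PySem.Str.join "-" [i, j, k])) := by
    intro i acc
    rw [PySem.List.foldl_congr_mem tickers _
      (fun acc j => acc ++ (tickers.filter (fun k => !(i == j || i == k || j == k))).map
        (fun k => PySem.Str.join "-" [i, j, k])) acc
      (by intro acc j _; exact hk i j acc)]
    exact PySem.List.foldl_append_eq_flatMap _ _ _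
  rw [PySem.List.foldl_congr_mem tickers _
    (fun acc i => acc ++ tickers.flatMap (fun j =>
      (tickers.filter (fun k => !(i == j || i == k || j == k))).map
        (fun k => PySem.Str.join "-" [i, j, k]))) []
    (by intro acc i _; exact hj i acc)]
  rw [PySem.List.foldl_append_eq_flatMap, List.nil_append, pv_permsB_three tickers hl]
  refine List.flatMap_congr ?_
  intro i _
  refine pv_flatMap_filter tickers (fun j => j != i) _ _ ?_ ?_
  · intro j _ hij
    have hij' : (i == j) = false :=
      beq_eq_false_iff_ne.2 (fun h => (bne_iff_ne.1 hij) h.symm)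
    refine congrArg _ (List.filter_congr ?_)
    intro k _
    simp only [hij', Bool.false_or, Bool.not_or, bne]
    rw [Bool.beq_comm (a := i) (b := k), Bool.beq_comm (a := j) (b := k)]
  · intro j _ hij
    have hji : j = i := by simpa using hij
    subst hji
    simp

-- ===== VERDICT (by name: the statement is the Claim_ definition above) =====
theorem available_tickers_paths_spec : Claim_equal_available_tickers_paths := by
  intro product_list _ hpre
  show available_tickers_paths product_list = available_tickers_paths_alt product_list
  show (product_list.foldl pvStepA [], pvBiA (product_list.foldl pvStepA []),
        pvTriA (product_list.foldl pvStepA []))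
     = (PySem.List.dedup (product_list.foldl pvPartsStepB []),
        (pvPermsB 2 (PySem.List.dedup (product_list.foldl pvPartsStepB []))).map (PySem.Str.join "-"),
        (pvPermsB 3 (PySem.List.dedup (product_list.foldl pvPartsStepB []))).map (PySem.Str.join "-"))
  have ht : product_list.foldl pvStepA []
      = PySem.List.dedup (product_list.foldl pvPartsStepB []) := by
    rw [pv_parts_eq product_list [] hpre, List.nil_append,
      PySem.List.dedup_eq_ofList, PySem.Set.ofList_eq_foldl]
    exact pv_tickers_eq product_list [] hpre
  have hnd : (product_list.foldl pvStepA []).Nodup := by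
    rw [ht]; exact PySem.List.nodup_dedup _
  rw [pv_bi_eq _ hnd, pv_tri_eq _ hnd, ht]
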